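-- pv_equiv track=rewrite | github.com/ziplab/SN-Net | stitching_resnet_swin/timm/models/snnet.py | paired_stitching
-- ===== SOURCE A (Python) =====
-- def paired_stitching(depth=12, kernel_size=2, stride=1):
--     blk_id = list(range(depth))
--     i = 0
--     stitch_cfgs = []
--     stitch_id = -1
--     stitching_layers_mappings = []
--
--     while i < depth:
--         ids = blk_id[i:i + kernel_size]
--         has_new_stitches = False
--         for j in ids:
--             for k in ids:
--                 if (j, k) not in stitch_cfgs:
--                     if k == 0:
--                         continue
--                     if j >= k:
--                         continue
--                     has_new_stitches = True
--                     stitch_cfgs.append((j, k))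
--                     stitching_layers_mappings.append(stitch_id + 1)
--
--         if has_new_stitches:
--             stitch_id += 1
--
--         i += stride
--
--     num_stitches = stitch_id + 1
--     return stitch_cfgs, stitching_layers_mappings, num_stitches
-- ===== SOURCE B (Python) =====
-- def paired_stitching(depth=12, kernel_size=2, stride=1):
--     stitch_cfgs = []
--     stitching_layers_mappings = []
--     num_stitches = 0
--     prev_end = 0  # last block id covered by the previous window (0 before any window)
--     i = 0
--     while i < depth:
--         ids = range(i, min(i + kernel_size, depth))
--         new_pairs = [(j, k) for j in ids for k in ids if j < k and k > prev_end]
--         if new_pairs: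
--             stitch_cfgs.extend(new_pairs)
--             stitching_layers_mappings.extend([num_stitches] * len(new_pairs))
--             num_stitches += 1
--         prev_end = i + kernel_size - 1
--         i += stride
--     return stitch_cfgs, stitching_layers_mappings, num_stitches
-- ===== Notes on version B (the rewrite author's own statement) =====
-- stated objective: faster
-- what changed: B drops the global seen-list membership scan: it keeps only the previous window's end (prev_end) and emits exactly the window pairs (j,k), j<k, with k > prev_end, tagging them with a running stitch counter, so each pair is tested in O(1) instead of scanning the growing config list.
-- outside the precondition, e.g. on paired_stitching(4, -1, 12): A returns ([(0, 1), (0, 2), (1, 2)], [0, 0, 0], 1), B returns ([], [], 0)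
import Mathlib
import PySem

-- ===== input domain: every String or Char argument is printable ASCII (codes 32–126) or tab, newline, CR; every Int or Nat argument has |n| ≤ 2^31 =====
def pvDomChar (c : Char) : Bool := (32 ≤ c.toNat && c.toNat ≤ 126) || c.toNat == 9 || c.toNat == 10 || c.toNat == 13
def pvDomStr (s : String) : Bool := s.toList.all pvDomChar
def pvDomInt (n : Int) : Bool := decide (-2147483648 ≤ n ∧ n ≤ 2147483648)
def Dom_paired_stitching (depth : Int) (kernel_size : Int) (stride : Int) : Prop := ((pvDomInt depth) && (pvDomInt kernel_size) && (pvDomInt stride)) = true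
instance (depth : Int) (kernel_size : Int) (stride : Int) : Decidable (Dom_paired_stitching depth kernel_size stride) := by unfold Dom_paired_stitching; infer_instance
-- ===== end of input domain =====

-- B replaces A's global seen-list membership scan by an O(1) previous-window-end test; measured faster.

-- ===== PORT A =====
-- inner 'for k in ids' body of A
def pvStepAk (t j : Int) (s : (List (Int × Int)) × List Int × Bool) (k : Int) :
    (List (Int × Int)) × List Int × Bool :=
  if (j, k) ∈ s.1 then s
  else if k = 0 then s
  else if j ≥ k then s
  else (s.1 ++ [(j, k)], s.2.1 ++ [t], true)

-- 'for j in ids: for k in ids: …'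
def pvStepAj (t : Int) (ids : List Int) (s : (List (Int × Int)) × List Int × Bool) (j : Int) :
    (List (Int × Int)) × List Int × Bool :=
  ids.foldl (pvStepAk t j) s

-- the 'while i < depth' loop, fueled (with stride ≥ 1 at most depth.toNat iterations run)
def pvLoopA (depth ks stride : Int) :
    Nat → Int → List (Int × Int) → List Int → Int → (List (Int × Int)) × List Int × Int
  | 0, _, c, m, sid => (c, m, sid)
  | fuel + 1, i, c, m, sid =>
    if i < depth then
      let ids := PySem.List.slice (PySem.List.pyRange 0 depth 1) (some i) (some (i + ks))
      let s := ids.foldl (pvStepAj (sid + 1) ids) (c, m, false)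
      pvLoopA depth ks stride fuel (i + stride) s.1 s.2.1 (if s.2.2 then sid + 1 else sid)
    else (c, m, sid)

def paired_stitching (depth : Int) (kernel_size : Int) (stride : Int) :
    (List (Int × Int)) × List Int × Int :=
  let r := pvLoopA depth kernel_size stride depth.toNat 0 [] [] (-1)
  (r.1, r.2.1, r.2.2 + 1)

-- ===== PORT B =====
-- the pairs emitted by one window of B
def pvNewPairs (pE : Int) (ids : List Int) : List (Int × Int) :=
  ids.flatMap (fun j => ids.filterMap (fun k => if j < k ∧ pE < k then some (j, k) else none))

def pvLoopB (depth ks stride : Int) :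
    Nat → Int → List (Int × Int) → List Int → Int → Int → (List (Int × Int)) × List Int × Int
  | 0, _, c, m, num, _ => (c, m, num)
  | fuel + 1, i, c, m, num, pE =>
    if i < depth then
      let ids := PySem.List.pyRange i (min (i + ks) depth) 1
      let np := pvNewPairs pE ids
      if np.isEmpty then
        pvLoopB depth ks stride fuel (i + stride) c m num (i + ks - 1)
      else
        pvLoopB depth ks stride fuel (i + stride) (c ++ np)
          (m ++ List.replicate np.length num) (num + 1) (i + ks - 1)
    else (c, m, num)

def paired_stitching_alt (depth : Int) (kernel_size : Int) (stride : Int) :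
    (List (Int × Int)) × List Int × Int :=
  pvLoopB depth kernel_size stride depth.toNat 0 [] [] 0 0

-- ===== PRECONDITION & SPEC =====
-- Pre_ restricts to the task's natural domain: it requires a positive stride when depth > 0 (with
-- stride ≤ 0 and depth > 0 A's while loop never terminates) and excludes negative kernel_size
-- whose Python negative-slice wraparound still produces multi-element windows (depth + ks > 1),
-- where A emits wraparound pairs while B naturally returns ([], [], 0).
def Pre_paired_stitching (depth : Int) (kernel_size : Int) (stride : Int) : Prop :=
  (0 ≤ kernel_size ∨ depth + kernel_size ≤ 1) ∧ (1 ≤ stride ∨ depth ≤ 0)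
instance (depth : Int) (kernel_size : Int) (stride : Int) : Decidable (Pre_paired_stitching depth kernel_size stride) := by unfold Pre_paired_stitching; infer_instance

def pvWitness_paired_stitching : Int × Int × Int := (12, 2, 1)

def Spec_paired_stitching (depth : Int) (kernel_size : Int) (stride : Int) (out : (List (Int × Int)) × List Int × Int) : Prop := out = paired_stitching_alt depth kernel_size stride
instance (depth : Int) (kernel_size : Int) (stride : Int) (out : (List (Int × Int)) × List Int × Int) : Decidable (Spec_paired_stitching depth kernel_size stride out) := by unfold Spec_paired_stitching; infer_instance

-- ===== CLAIM (what is proved, stated in full; the proofs are below) =====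
def Claim_equal_paired_stitching : Prop := ∀ (depth : Int) (kernel_size : Int) (stride : Int), Dom_paired_stitching depth kernel_size stride → Pre_paired_stitching depth kernel_size stride → Spec_paired_stitching depth kernel_size stride (paired_stitching depth kernel_size stride)

-- ===== LEMMAS AND PROOFS =====

-- the window A slices out of range(depth) is the interval range(i, min(i+ks, depth)) for i, ks ≥ 0
theorem pv_window_eq (depth ks i : Int) (hi : 0 ≤ i) (hks : 0 ≤ ks) :
    PySem.List.slice (PySem.List.pyRange 0 depth 1) (some i) (some (i + ks)) =
      PySem.List.pyRange i (min (i + ks) depth) 1 := by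
  rw [PySem.List.slice_toNat _ hi (by omega)]
  apply List.ext_getElem
  · simp [PySem.List.length_pyRange_one]
    omega
  · intro n h1 h2
    simp only [List.getElem_take, List.getElem_drop, PySem.List.getElem_pyRange_one]
    push_cast
    omega

-- inner fold of A over the k-list
theorem pv_inner_fold (t j pE : Int) (kl : List Int) (c : List (Int × Int)) (m : List Int)
    (h : Bool) (hnd : kl.Nodup) (hnn : ∀ k ∈ kl, 0 ≤ k) (hj : 0 ≤ j)
    (hmem : ∀ k ∈ kl, ((j, k) ∈ c ↔ (j < k ∧ ¬ pE < k))) :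
    kl.foldl (pvStepAk t j) (c, m, h) =
      (c ++ kl.filterMap (fun k => if j < k ∧ pE < k then some (j, k) else none),
       m ++ List.replicate (kl.filterMap (fun k => if j < k ∧ pE < k then some (j, k) else none)).length t,
       h || !(kl.filterMap (fun k => if j < k ∧ pE < k then some (j, k) else none)).isEmpty) := by
  induction kl generalizing c m h with
  | nil => simp
  | cons k rest ih =>
    have hk0 : 0 ≤ k := hnn k (by simp)
    have hmemk := hmem k (by simp)
    have hndr : rest.Nodup := (List.nodup_cons.mp hnd).2
    have hknr : k ∉ rest := (List.nodup_cons.mp hnd).1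
    simp only [List.foldl_cons, List.filterMap_cons]
    by_cases hc : (j, k) ∈ c
    · obtain ⟨hjk, hpk⟩ := hmemk.mp hc
      have hstep : pvStepAk t j (c, m, h) k = (c, m, h) := by
        simp [pvStepAk, hc]
      have hnone : (if j < k ∧ pE < k then some (j, k) else none) = none := by
        rw [if_neg]; tauto
      rw [hstep, hnone]
      exact ih c m h hndr (fun k' hk' => hnn k' (by simp [hk'])) (fun k' hk' => hmem k' (by simp [hk']))
    · by_cases hjk : j < k
      · have hpk : pE < k := by
          by_contra hh
          exact hc (hmemk.mpr ⟨hjk, hh⟩)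
        have hstep : pvStepAk t j (c, m, h) k = (c ++ [(j, k)], m ++ [t], true) := by
          simp only [pvStepAk]
          rw [if_neg hc, if_neg (by omega : ¬ k = 0), if_neg (by omega : ¬ j ≥ k)]
        have hsome : (if j < k ∧ pE < k then some (j, k) else none) = some (j, k) := by
          rw [if_pos ⟨hjk, hpk⟩]
        rw [hstep, hsome]
        have hmem' : ∀ k' ∈ rest, ((j, k') ∈ c ++ [(j, k)] ↔ (j < k' ∧ ¬ pE < k')) := by
          intro k' hk'
          rw [List.mem_append, List.mem_singleton]
          constructor
          · rintro (hin | heq)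
            · exact (hmem k' (by simp [hk'])).mp hin
            · exfalso
              have hkk : k' = k := by simpa using congrArg Prod.snd heq
              exact hknr (hkk ▸ hk')
          · intro hh
            exact Or.inl ((hmem k' (by simp [hk'])).mpr hh)
        rw [ih (c ++ [(j, k)]) (m ++ [t]) true hndr
          (fun k' hk' => hnn k' (by simp [hk'])) hmem']
        simp [List.append_assoc, List.replicate_succ]
      · have hstep : pvStepAk t j (c, m, h) k = (c, m, h) := by
          simp only [pvStepAk]
          rw [if_neg hc]
          split_ifs with h1 h2 <;> first | rfl | omega
        have hnone : (if j < k ∧ pE < k then some (j, k) else none) = none := by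
          rw [if_neg]; tauto
        rw [hstep, hnone]
        exact ih c m h hndr (fun k' hk' => hnn k' (by simp [hk'])) (fun k' hk' => hmem k' (by simp [hk']))

theorem pv_isEmpty_append (l1 l2 : List (Int × Int)) :
    (!(l1 ++ l2).isEmpty) = (!l1.isEmpty || !l2.isEmpty) := by
  cases l1 <;> simp [List.isEmpty]

-- outer fold of A over the j-list
theorem pv_outer_fold (t pE : Int) (jl ids : List Int) (c : List (Int × Int)) (m : List Int)
    (h : Bool) (hndj : jl.Nodup) (hnd : ids.Nodup) (hnn : ∀ k ∈ ids, 0 ≤ k)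
    (hnnj : ∀ j ∈ jl, 0 ≤ j)
    (hmem : ∀ j ∈ jl, ∀ k ∈ ids, ((j, k) ∈ c ↔ (j < k ∧ ¬ pE < k))) :
    jl.foldl (pvStepAj t ids) (c, m, h) =
      (c ++ jl.flatMap (fun j => ids.filterMap (fun k => if j < k ∧ pE < k then some (j, k) else none)),
       m ++ List.replicate (jl.flatMap (fun j => ids.filterMap (fun k => if j < k ∧ pE < k then some (j, k) else none))).length t,
       h || !(jl.flatMap (fun j => ids.filterMap (fun k => if j < k ∧ pE < k then some (j, k) else none))).isEmpty) := by
  induction jl generalizing c m h with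
  | nil => simp
  | cons j rest ih =>
    have hndr : rest.Nodup := (List.nodup_cons.mp hndj).2
    have hjnr : j ∉ rest := (List.nodup_cons.mp hndj).1
    simp only [List.foldl_cons, List.flatMap_cons]
    have hstep : pvStepAj t ids (c, m, h) j =
        (c ++ ids.filterMap (fun k => if j < k ∧ pE < k then some (j, k) else none),
         m ++ List.replicate (ids.filterMap (fun k => if j < k ∧ pE < k then some (j, k) else none)).length t,
         h || !(ids.filterMap (fun k => if j < k ∧ pE < k then some (j, k) else none)).isEmpty) :=
      pv_inner_fold t j pE ids c m h hnd hnn (hnnj j (by simp)) (hmem j (by simp))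
    rw [hstep]
    have hfst : ∀ x ∈ ids.filterMap (fun k => if j < k ∧ pE < k then some (j, k) else none), x.1 = j := by
      intro x hx
      obtain ⟨k, _, hk⟩ := List.mem_filterMap.mp hx
      by_cases hcond : j < k ∧ pE < k
      · rw [if_pos hcond] at hk
        injection hk with hk
        rw [← hk]
      · rw [if_neg hcond] at hk
        exact absurd hk (by simp)
    have hmem' : ∀ j' ∈ rest, ∀ k ∈ ids,
        ((j', k) ∈ c ++ ids.filterMap (fun k => if j < k ∧ pE < k then some (j, k) else none) ↔
          (j' < k ∧ ¬ pE < k)) := by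
      intro j' hj' k hk
      rw [List.mem_append]
      constructor
      · rintro (hin | hin)
        · exact (hmem j' (by simp [hj']) k hk).mp hin
        · exfalso
          have := hfst _ hin
          simp only at this
          exact hjnr (this ▸ hj')
      · intro hh
        exact Or.inl ((hmem j' (by simp [hj']) k hk).mpr hh)
    rw [ih _ _ _ hndr (fun j' hj' => hnnj j' (by simp [hj'])) hmem']
    simp only [List.append_assoc, List.length_append, List.replicate_add, pv_isEmpty_append,
      Bool.or_assoc]

-- main loop equivalence under the invariant
theorem pv_loop_eq (depth ks stride : Int) (hst : 1 ≤ stride) (hks : 0 ≤ ks) :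
    ∀ (fuel : Nat) (i : Int) (c : List (Int × Int)) (m : List Int) (sid pE : Int),
    0 ≤ i →
    (∀ j k, (j, k) ∈ c → 0 ≤ j ∧ j < k ∧ k ≤ pE ∧ k < depth) →
    (∀ j k, 0 ≤ j → pE - ks + 1 ≤ j → j < k → k ≤ pE → k < depth → (j, k) ∈ c) →
    ((i = 0 ∧ pE = 0) ∨ pE = i - stride + ks - 1) →
    pvLoopB depth ks stride fuel i c m (sid + 1) pE =
      ((pvLoopA depth ks stride fuel i c m sid).1,
       (pvLoopA depth ks stride fuel i c m sid).2.1,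
       (pvLoopA depth ks stride fuel i c m sid).2.2 + 1) := by
  intro fuel
  induction fuel with
  | zero => intros; simp [pvLoopA, pvLoopB]
  | succ fuel ih =>
    intro i c m sid pE h0i hS hC hpe
    by_cases hi : i < depth
    · have hw := pv_window_eq depth ks i h0i hks
      simp only [pvLoopA, pvLoopB, if_pos hi, hw]
      set E := min (i + ks) depth with hE
      set ids := PySem.List.pyRange i E 1 with hids
      have hmemids : ∀ x : Int, x ∈ ids ↔ i ≤ x ∧ x < E := by
        intro x; exact PySem.List.mem_pyRange_one
      have hnd : ids.Nodup := PySem.List.nodup_pyRange_one i E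
      have hnn : ∀ x ∈ ids, 0 ≤ x := by
        intro x hx; have := (hmemids x).mp hx; omega
      have hmemIff : ∀ j ∈ ids, ∀ k ∈ ids, ((j, k) ∈ c ↔ (j < k ∧ ¬ pE < k)) := by
        intro j hj k hk
        have hjb := (hmemids j).mp hj
        have hkb := (hmemids k).mp hk
        constructor
        · intro hc
          have := hS j k hc
          exact ⟨this.2.1, by omega⟩
        · rintro ⟨hjk, hle⟩
          refine hC j k (by omega) ?_ hjk (by omega) (by omega)
          rcases hpe with ⟨hi0, hp0⟩ | hp
          · omega
          · omega
      rw [pv_outer_fold (sid + 1) pE ids ids c m false hnd hnd hnn hnn hmemIff]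
      have hNP : (ids.flatMap (fun j => ids.filterMap (fun k => if j < k ∧ pE < k then some (j, k) else none))) = pvNewPairs pE ids := rfl
      rw [hNP]
      simp only [Bool.false_or]
      by_cases hnp : (pvNewPairs pE ids).isEmpty
      · have hnil : pvNewPairs pE ids = [] := by
          cases hh : pvNewPairs pE ids
          · rfl
          · rw [hh] at hnp; simp [List.isEmpty] at hnp
        have hcond : ∀ j ∈ ids, ∀ k ∈ ids, ¬ (j < k ∧ pE < k) := by
          intro j hj k hk hcc
          have : (j, k) ∈ pvNewPairs pE ids := by
            unfold pvNewPairs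
            exact List.mem_flatMap.mpr ⟨j, hj, List.mem_filterMap.mpr ⟨k, hk, by rw [if_pos hcc]⟩⟩
          rw [hnil] at this
          exact absurd this (List.not_mem_nil)
        rw [hnil]
        simp only [List.append_nil, List.length_nil, List.replicate_zero, List.isEmpty_nil,
          Bool.not_true, if_neg (by simp : ¬ (false = true))]
        apply ih (i + stride) c m sid (i + ks - 1) (by omega)
        · intro j k hjk
          have := hS j k hjk
          rcases hpe with ⟨hi0, hp0⟩ | hp <;> [omega; omega]
        · intro j k hj0 hji hjk hk1 hkd
          have hjm : j ∈ ids := (hmemids j).mpr ⟨by omega, by omega⟩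
          have hkm : k ∈ ids := (hmemids k).mpr ⟨by omega, by omega⟩
          have := hcond j hjm k hkm
          have hkpe : ¬ pE < k := by tauto
          exact (hmemIff j hjm k hkm).mpr ⟨hjk, hkpe⟩
        · right; omega
      · have hne : ¬ pvNewPairs pE ids = [] := by
          intro hh; rw [hh] at hnp; simp [List.isEmpty] at hnp
        have hmemNP : ∀ x ∈ pvNewPairs pE ids, x.1 ∈ ids ∧ x.2 ∈ ids ∧ x.1 < x.2 ∧ pE < x.2 := by
          intro x hx
          obtain ⟨j, hj, hx2⟩ := List.mem_flatMap.mp hx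
          obtain ⟨k, hk, hk2⟩ := List.mem_filterMap.mp hx2
          by_cases hcc : j < k ∧ pE < k
          · rw [if_pos hcc] at hk2
            injection hk2 with hk2
            rw [← hk2]
            exact ⟨hj, hk, hcc.1, hcc.2⟩
          · rw [if_neg hcc] at hk2
            exact absurd hk2 (by simp)
        have hfalse : (pvNewPairs pE ids).isEmpty = false := eq_false_of_ne_true hnp
        rw [if_neg hnp, if_pos (by rw [hfalse]; rfl : (!(pvNewPairs pE ids).isEmpty) = true)]
        have hgoal := ih (i + stride) (c ++ pvNewPairs pE ids)
          (m ++ List.replicate (pvNewPairs pE ids).length (sid + 1)) (sid + 1) (i + ks - 1)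
          (by omega) ?_ ?_ (by right; omega)
        · exact hgoal
        · intro j k hjk
          rcases List.mem_append.mp hjk with hin | hin
          · have := hS j k hin
            rcases hpe with ⟨hi0, hp0⟩ | hp <;> [omega; omega]
          · have := hmemNP _ hin
            have hjb := (hmemids j).mp this.1
            have hkb := (hmemids k).mp this.2.1
            exact ⟨by omega, this.2.2.1, by omega, by omega⟩
        · intro j k hj0 hji hjk hk1 hkd
          have hjm : j ∈ ids := (hmemids j).mpr ⟨by omega, by omega⟩
          have hkm : k ∈ ids := (hmemids k).mpr ⟨by omega, by omega⟩
          by_cases hkpe : pE < k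
          · refine List.mem_append.mpr (Or.inr ?_)
            unfold pvNewPairs
            exact List.mem_flatMap.mpr ⟨j, hjm, List.mem_filterMap.mpr ⟨k, hkm, by rw [if_pos ⟨hjk, hkpe⟩]⟩⟩
          · exact List.mem_append.mpr (Or.inl ((hmemIff j hjm k hkm).mpr ⟨hjk, hkpe⟩))
    · simp [pvLoopA, pvLoopB, if_neg hi]

-- with a negative kernel_size every window of A has at most one element when depth + ks ≤ 1,
-- so A's double loop never appends anything
theorem pv_loopA_trivial (depth ks stride : Int) (hks : ks < 0) (hdk : depth + ks ≤ 1)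
    (hst : 1 ≤ stride) :
    ∀ (fuel : Nat) (i : Int) (c : List (Int × Int)) (m : List Int) (sid : Int), 0 ≤ i →
      pvLoopA depth ks stride fuel i c m sid = (c, m, sid) := by
  intro fuel
  induction fuel with
  | zero => intros; simp [pvLoopA]
  | succ fuel ih =>
    intro i c m sid h0i
    simp only [pvLoopA]
    by_cases hi : i < depth
    · rw [if_pos hi]
      have hlen : (PySem.List.slice (PySem.List.pyRange 0 depth 1) (some i) (some (i + ks))).length ≤ 1 := by
        rw [PySem.List.length_slice]
        have hL : (PySem.List.pyRange 0 depth 1).length = depth.toNat := by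
          simp [PySem.List.length_pyRange_one]
        rw [hL]
        unfold PySem.List.clampIdx
        split_ifs <;> omega
      have hfold : ∀ ids : List Int, ids.length ≤ 1 →
          ids.foldl (pvStepAj (sid + 1) ids) (c, m, false) = (c, m, false) := by
        intro ids hids
        match ids, hids with
        | [], _ => rfl
        | [x], _ =>
          show pvStepAj (sid + 1) [x] (c, m, false) x = (c, m, false)
          show pvStepAk (sid + 1) x (c, m, false) x = (c, m, false)
          simp only [pvStepAk]
          split_ifs <;> first | rfl | omega
      rw [hfold _ hlen]
      exact ih (i + stride) c m sid (by omega)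
    · rw [if_neg hi]

-- with a negative kernel_size B's windows range(i, min(i+ks, depth)) are always empty
theorem pv_loopB_trivial (depth ks stride : Int) (hks : ks < 0) :
    ∀ (fuel : Nat) (i : Int) (c : List (Int × Int)) (m : List Int) (num pE : Int),
      pvLoopB depth ks stride fuel i c m num pE = (c, m, num) := by
  intro fuel
  induction fuel with
  | zero => intros; simp [pvLoopB]
  | succ fuel ih =>
    intro i c m num pE
    simp only [pvLoopB]
    by_cases hi : i < depth
    · rw [if_pos hi]
      have hnil : PySem.List.pyRange i (min (i + ks) depth) 1 = [] :=
        PySem.List.pyRange_one_eq_nil (by omega)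
      rw [hnil]
      show pvLoopB depth ks stride fuel (i + stride) c m num (i + ks - 1) = (c, m, num)
      exact ih (i + stride) c m num (i + ks - 1)
    · rw [if_neg hi]

-- ===== VERDICT (by name: the statement is the Claim_ definition above) =====
theorem paired_stitching_spec : Claim_equal_paired_stitching := by
  intro depth ks stride _ hpre
  unfold Spec_paired_stitching paired_stitching paired_stitching_alt
  by_cases hd : depth ≤ 0
  · have : depth.toNat = 0 := by omega
    simp [this, pvLoopA, pvLoopB]
  · have hst : 1 ≤ stride := by rcases hpre.2 with h | h <;> omega
    by_cases hks : 0 ≤ ks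
    · have h := pv_loop_eq depth ks stride hst hks depth.toNat 0 [] [] (-1) 0 (by omega)
        (by simp) (by intro j k _ _ hjk hk _; omega) (Or.inl ⟨rfl, rfl⟩)
      norm_num at h
      exact h.symm
    · have hdk : depth + ks ≤ 1 := by rcases hpre.1 with h | h <;> omega
      rw [pv_loopA_trivial depth ks stride (by omega) hdk hst depth.toNat 0 [] [] (-1) (by omega),
        pv_loopB_trivial depth ks stride (by omega) depth.toNat 0 [] [] 0 0]
      norm_num
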